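-- pv_equiv track=rewrite | github.com/jak010/study-algorithm-src | Programmers/Level0/240501_커피심부름.py | solution
-- ===== SOURCE A (Python) =====
-- def solution(order):
--     total = 0
--
--     for x in order:
--
--         if x.find("americano") != -1:
--             total += 4500
--         if x.find('cafelatte') != -1:
--             total += 5000
--         if x.find('anything') != -1:
--             total += 4500
--
--     return total
-- ===== SOURCE B (Python) =====
-- def solution(order):
--     # three independent scans, one per keyword, instead of one loop with three tests
--     return (4500 * sum("americano" in x for x in order)
--             + 5000 * sum("cafelatte" in x for x in order)
--             + 4500 * sum("anything" in x for x in order))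
-- ===== Notes on version B (the rewrite author's own statement) =====
-- stated objective: alternative
-- what changed: Replaces the single loop with three sequential substring tests by three independent generator-expression scans, one per keyword, combined in a closed-form price formula.
import Mathlib
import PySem

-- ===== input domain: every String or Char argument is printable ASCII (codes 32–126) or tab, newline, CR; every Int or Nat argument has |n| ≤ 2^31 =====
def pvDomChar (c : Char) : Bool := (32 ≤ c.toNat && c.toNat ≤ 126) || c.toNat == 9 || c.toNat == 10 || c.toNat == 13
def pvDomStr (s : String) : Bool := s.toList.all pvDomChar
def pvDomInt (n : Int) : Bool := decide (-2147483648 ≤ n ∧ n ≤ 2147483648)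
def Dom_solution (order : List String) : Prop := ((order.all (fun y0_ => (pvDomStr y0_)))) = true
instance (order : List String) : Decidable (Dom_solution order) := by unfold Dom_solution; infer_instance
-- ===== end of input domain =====

-- B replaces A's single loop with three tests by three independent per-keyword scans (alternative decomposition).

-- ===== PORT A =====
def solution (order : List String) : Int :=
  order.foldl (fun total x =>
    let total := if PySem.Str.find x "americano" ≠ -1 then total + 4500 else total
    let total := if PySem.Str.find x "cafelatte" ≠ -1 then total + 5000 else total
    if PySem.Str.find x "anything" ≠ -1 then total + 4500 else total) 0

-- ===== PORT B =====
def solution_alt (order : List String) : Int :=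
  4500 * (order.countP (fun x => PySem.Str.isIn "americano" x) : Int)
  + 5000 * (order.countP (fun x => PySem.Str.isIn "cafelatte" x) : Int)
  + 4500 * (order.countP (fun x => PySem.Str.isIn "anything" x) : Int)

-- ===== PRECONDITION & SPEC =====
def Spec_solution (order : List String) (out : Int) : Prop := out = solution_alt order
instance (order : List String) (out : Int) : Decidable (Spec_solution order out) := by unfold Spec_solution; infer_instance

-- ===== CLAIM =====
def Claim_equal_solution : Prop := ∀ (order : List String), Dom_solution order → Spec_solution order (solution order)

-- ===== LEMMAS AND PROOFS =====

theorem isIn_eq_find_ne (sub x : String) :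
    PySem.Str.isIn sub x = decide (PySem.Str.find x sub ≠ -1) := by
  by_cases h : sub.toList <:+: x.toList
  · rw [(PySem.Str.isIn_iff_infix sub x).mpr h,
        decide_eq_true ((PySem.Str.find_ne_neg_one_iff x sub).mpr h)]
  · have h1 : PySem.Str.isIn sub x = false := by
      cases hb : PySem.Str.isIn sub x
      · rfl
      · exact absurd ((PySem.Str.isIn_iff_infix sub x).mp hb) h
    have h2 : ¬ (PySem.Str.find x sub ≠ -1) := fun hc =>
      h ((PySem.Str.find_ne_neg_one_iff x sub).mp hc)
    rw [h1, decide_eq_false h2]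

theorem solution_foldl (order : List String) (a : Int) :
    order.foldl (fun total x =>
      let total := if PySem.Str.find x "americano" ≠ -1 then total + 4500 else total
      let total := if PySem.Str.find x "cafelatte" ≠ -1 then total + 5000 else total
      if PySem.Str.find x "anything" ≠ -1 then total + 4500 else total) a
    = a + 4500 * (order.countP (fun x => PySem.Str.isIn "americano" x) : Int)
        + 5000 * (order.countP (fun x => PySem.Str.isIn "cafelatte" x) : Int)
        + 4500 * (order.countP (fun x => PySem.Str.isIn "anything" x) : Int) := by
  induction order generalizing a with
  | nil => simp
  | cons x t ih =>
    simp only [List.foldl_cons, ih, List.countP_cons, isIn_eq_find_ne, decide_eq_true_eq]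
    split_ifs <;> push_cast <;> ring

-- ===== VERDICT =====
theorem solution_spec : Claim_equal_solution := by
  intro order _
  show solution order = solution_alt order
  unfold solution solution_alt
  rw [solution_foldl]
  ring
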